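-- pv_equiv track=rewrite | github.com/DanielCortild/Google-KickStart | 2018/2018A-1.py | nextGood
-- ===== SOURCE A (Python) =====
-- def nextGood(n):
--   n_list = [int(c) for c in str(n)]
--   start = 0
--   for (i, k) in enumerate(n_list):
--     if k % 2 == 1:
--       if n_list[i] == 9:
--         n_list[i] = 0
--         ij = i
--         while ij > 0 and n_list[ij-1] == 8:
--           n_list[ij-1] = 0
--           ij -= 1
--         if ij == 0:
--           start = 2
--         else:
--           n_list[ij-1] += 2
--       else:
--         n_list[i] += 1
--       for j in range(len(n_list[i+1:])):
--         n_list[i + j + 1] = 0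
--       break
--   return int(''.join([str(start), *map(str, n_list)]))
-- ===== SOURCE B (Python) =====
-- def nextGood(n):
--     def f(m):
--         if m <= 0:
--             return 0
--         q, r = divmod(m, 10)
--         g = f(q)
--         if g != q:
--             return g * 10
--         if r == 9:
--             return f(q + 1) * 10
--         return m + r % 2
--     return f(n)
-- ===== Notes on version B (the rewrite author's own statement) =====
-- stated objective: simpler
-- what changed: A converts n to a digit list and patches it in place (left-to-right scan for the first odd digit, a while-loop carry over trailing 8s, zeroing the tail, then re-parsing the string); B computes the same least all-even-digit number >= n purely arithmetically by one short recursion on divmod(m, 10), with no strings or lists.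
import Mathlib
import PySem

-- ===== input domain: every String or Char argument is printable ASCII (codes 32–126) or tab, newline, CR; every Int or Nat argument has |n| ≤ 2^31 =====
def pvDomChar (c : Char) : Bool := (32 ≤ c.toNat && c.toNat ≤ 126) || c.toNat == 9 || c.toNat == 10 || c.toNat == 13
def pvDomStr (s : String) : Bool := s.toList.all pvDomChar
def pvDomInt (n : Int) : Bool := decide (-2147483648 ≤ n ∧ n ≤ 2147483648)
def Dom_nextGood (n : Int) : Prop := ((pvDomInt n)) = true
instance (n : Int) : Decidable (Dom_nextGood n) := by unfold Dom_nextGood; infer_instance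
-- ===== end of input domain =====

-- B replaces A's string/digit-list surgery (scan for the first odd digit, in-place bump with
-- an 8-carry while-loop, re-parse) by one short arithmetic recursion on divmod(m, 10) computing
-- the same value; objective: simpler. Pre_ excludes negative n, where A raises ValueError.


-- ===== PORT A =====
-- The inner `while ij > 0 and n_list[ij-1] == 8` carry loop: `rv` holds the digits before the 9
-- (the already-scanned prefix) in reverse, `acc` the digits already set to 0.
def aCarry : List Int → List Int → Int × List Int
  | [], acc => (2, acc)                                   -- ij == 0: start = 2
  | p :: ps, acc => if p = 8 then aCarry ps (0 :: acc) else (0, ps.reverse ++ (p + 2) :: acc)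

def aScan : List Int → List Int → Int × List Int
  | pre, [] => (0, pre.reverse)
  | pre, k :: tl =>
    if PySem.Int.mod k 2 = 1 then
      if k = 9 then aCarry pre (0 :: tl.map (fun _ => 0))
      else (0, pre.reverse ++ (k + 1) :: tl.map (fun _ => 0))
    else aScan (k :: pre) tl

-- `aScan` is the `for (i, k) in enumerate(n_list)` loop with its `break`: `pre` is the scanned
-- prefix (digits with k % 2 == 0) in reverse, `rest` the digits from position i on; the
-- `for j in range(len(n_list[i+1:]))` zeroing of the tail is the `map (fun _ => 0)`.

def nextGood (n : Int) : Int :=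
  -- n_list = [int(c) for c in str(n)]   (int('-') raises for negative n: outside Pre_)
  let n_list : List Int := (PySem.Int.toChars n).map (fun c => (PySem.Int.ofChars? [c]).getD 0)
  let p := aScan [] n_list
  -- int(''.join([str(start), *map(str, n_list)])): start is 0 or 2 and every entry of the list
  -- is a single decimal digit 0–9, so int() of the concatenated digit characters is exactly the
  -- base-10 value of the sequence start :: n_list; the fold below is exact on that domain.
  (p.1 :: p.2).foldl (fun a d => 10 * a + d) 0

-- ===== PORT B =====
-- termination facts for the port of Source B's inner f (cited by name in decreasing_by)
theorem fAux_dec1 (m : Int) (h : ¬ m ≤ 0) : (PySem.Int.floordiv m 10).toNat < m.toNat := by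
  have h1 := Int.fdiv_eq_ediv_of_nonneg m (by norm_num : (0:Int) ≤ 10)
  simp only [PySem.Int.floordiv]
  omega

theorem fAux_dec2 (m : Int) (h : ¬ m ≤ 0) (h9 : PySem.Int.mod m 10 = 9) :
    (PySem.Int.floordiv m 10 + 1).toNat < m.toNat := by
  have h1 := Int.fdiv_eq_ediv_of_nonneg m (by norm_num : (0:Int) ≤ 10)
  have h2 := Int.fmod_eq_emod_of_nonneg m (by norm_num : (0:Int) ≤ 10)
  simp only [PySem.Int.floordiv, PySem.Int.mod] at *
  omega

-- the inner `def f(m)` of Source B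

def fAux (m : Int) : Int :=
  if m ≤ 0 then 0
  else
    let q := PySem.Int.floordiv m 10
    let r := PySem.Int.mod m 10
    let g := fAux q
    if g ≠ q then g * 10
    else if r = 9 then fAux (q + 1) * 10
    else m + PySem.Int.mod r 2
termination_by m.toNat
decreasing_by
  · exact fAux_dec1 m (by assumption)
  · rename_i hr9
    exact fAux_dec2 m (by assumption) hr9

def nextGood_alt (n : Int) : Int := fAux n

-- ===== PRECONDITION & SPEC =====
-- Pre_ excludes exactly the negative n: there A raises ValueError (int() on the '-' sign character).
def Pre_nextGood (n : Int) : Prop := 0 ≤ n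
instance (n : Int) : Decidable (Pre_nextGood n) := by unfold Pre_nextGood; infer_instance
def pvWitness_nextGood : Int := 13

def Spec_nextGood (n : Int) (out : Int) : Prop := out = nextGood_alt n
instance (n : Int) (out : Int) : Decidable (Spec_nextGood n out) := by unfold Spec_nextGood; infer_instance

-- ===== CLAIM (what is proved, stated in full; the proofs are below) =====
def Claim_equal_nextGood : Prop := ∀ (n : Int), Dom_nextGood n → Pre_nextGood n → Spec_nextGood n (nextGood n)

-- ===== LEMMAS AND PROOFS =====

def valI (l : List Int) : Int := l.foldl (fun a d => 10 * a + d) 0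

theorem evdI_dec (m : Int) (h : ¬ m ≤ 0) : (m / 10).toNat < m.toNat := by omega

def evdI (m : Int) : Bool :=
  if m ≤ 0 then true else (decide (m % 2 = 0)) && evdI (m / 10)
termination_by m.toNat
decreasing_by exact evdI_dec m (by assumption)

def G (m : Int) : Prop := 0 ≤ m ∧ evdI m = true

def IsNext (n R : Int) : Prop := G R ∧ n ≤ R ∧ ∀ k, G k → n ≤ k → R ≤ k

theorem valI_foldl (l : List Int) (a : Int) :
    l.foldl (fun a d => 10 * a + d) a = a * 10 ^ l.length + valI l := by
  induction l generalizing a with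
  | nil => simp [valI]
  | cons d t ih =>
    have h2 : valI (d :: t) = List.foldl (fun a d => 10 * a + d) (10 * 0 + d) t := by
      simp only [valI, List.foldl_cons]
    simp only [List.foldl_cons, List.length_cons]
    rw [ih (10 * a + d), h2, ih (10 * 0 + d), pow_succ]
    ring

theorem valI_cons (d : Int) (t : List Int) : valI (d :: t) = d * 10 ^ t.length + valI t := by
  have h1 := valI_foldl t (10 * 0 + d)
  have h2 : valI (d :: t) = List.foldl (fun a d => 10 * a + d) (10 * 0 + d) t := by
    simp only [valI, List.foldl_cons]
  rw [h2, h1]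
  norm_num

theorem valI_append (xs ys : List Int) :
    valI (xs ++ ys) = valI xs * 10 ^ ys.length + valI ys := by
  induction xs with
  | nil => simp [valI]
  | cons x t ih =>
    simp only [List.cons_append, valI_cons, List.length_append, ih]
    ring

theorem valI_zeros (l : List Int) (h : ∀ d ∈ l, d = 0) : valI l = 0 := by
  induction l with
  | nil => simp [valI]
  | cons d t ih =>
    rw [valI_cons, h d (by simp), ih (fun x hx => h x (by simp [hx]))]
    ring

theorem valI_nonneg (l : List Int) (h : ∀ d ∈ l, 0 ≤ d) : 0 ≤ valI l := by
  induction l with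
  | nil => simp [valI]
  | cons d t ih =>
    rw [valI_cons]
    have h1 := h d (by simp)
    have h2 := ih (fun x hx => h x (by simp [hx]))
    positivity

theorem valI_lt (l : List Int) (h : ∀ d ∈ l, 0 ≤ d ∧ d ≤ 9) : valI l < 10 ^ l.length := by
  induction l with
  | nil => simp [valI]
  | cons d t ih =>
    rw [valI_cons, List.length_cons]
    have h1 := h d (by simp)
    have h2 := ih (fun x hx => h x (by simp [hx]))
    have hB : (0:Int) < 10 ^ t.length := by positivity
    have : d * 10 ^ t.length ≤ 9 * 10 ^ t.length :=
      mul_le_mul_of_nonneg_right h1.2 hB.le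
    rw [pow_succ]
    nlinarith

theorem G_zero : G 0 := by
  constructor
  · omega
  · rw [evdI]; simp

theorem G_ten (a r : Int) (ha : 0 ≤ a) (hr0 : 0 ≤ r) (hr : r < 10) :
    G (10 * a + r) ↔ (r % 2 = 0 ∧ G a) := by
  by_cases h0 : 10 * a + r ≤ 0
  · have hae : a = 0 := by omega
    have hre : r = 0 := by omega
    subst hae; subst hre
    norm_num
  · constructor
    · rintro ⟨h1, h2⟩
      rw [evdI, if_neg h0] at h2
      simp only [Bool.and_eq_true, decide_eq_true_eq] at h2
      have he1 : (10 * a + r) % 2 = r % 2 := by omega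
      have he2 : (10 * a + r) / 10 = a := by omega
      rw [he1] at h2; rw [he2] at h2
      exact ⟨h2.1, ha, h2.2⟩
    · rintro ⟨h1, h2, h3⟩
      refine ⟨by omega, ?_⟩
      rw [evdI, if_neg h0]
      simp only [Bool.and_eq_true, decide_eq_true_eq]
      have he1 : (10 * a + r) % 2 = r % 2 := by omega
      have he2 : (10 * a + r) / 10 = a := by omega
      rw [he1, he2]
      exact ⟨h1, h3⟩

theorem G_parity (k : Int) (h : G k) : k % 2 = 0 := by
  obtain ⟨h1, h2⟩ := h
  by_cases h0 : k ≤ 0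
  · have : k = 0 := by omega
    omega
  · rw [evdI, if_neg h0] at h2
    simp only [Bool.and_eq_true, decide_eq_true_eq] at h2
    exact h2.1

theorem G_div_ten (k : Int) (h : G k) : G (k / 10) := by
  obtain ⟨h1, h2⟩ := h
  by_cases h0 : k ≤ 0
  · have : k = 0 := by omega
    subst this; exact G_zero
  · rw [evdI, if_neg h0] at h2
    simp only [Bool.and_eq_true, decide_eq_true_eq] at h2
    exact ⟨by omega, h2.2⟩

theorem G_div_pow (k : Int) (j : Nat) (h : G k) : G (k / 10 ^ j) := by
  induction j with
  | zero => simpa using h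
  | succ j ih =>
    have : k / 10 ^ (j + 1) = (k / 10 ^ j) / 10 := by
      rw [Int.ediv_ediv_of_nonneg (by positivity), pow_succ]
    rw [this]
    exact G_div_ten _ ih

theorem G_mul_ten (a : Int) (h : G a) : G (a * 10) := by
  have := (G_ten a 0 h.1 le_rfl (by norm_num)).mpr ⟨by norm_num, h⟩
  rwa [add_zero, mul_comm] at this

theorem G_mul_pow (a : Int) (j : Nat) (h : G a) : G (a * 10 ^ j) := by
  induction j with
  | zero => simpa using h
  | succ j ih =>
    rw [pow_succ, ← mul_assoc]
    exact G_mul_ten _ ih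

theorem valI_good (l : List Int) (h : ∀ d ∈ l, 0 ≤ d ∧ d ≤ 9 ∧ d % 2 = 0) : G (valI l) := by
  induction l using List.reverseRecOn with
  | nil => exact G_zero
  | append_singleton xs d ih =>
    have hd := h d (by simp)
    have hxs : G (valI xs) := ih (fun x hx => h x (by simp [hx]))
    have : valI (xs ++ [d]) = 10 * valI xs + d := by
      rw [valI_append]
      simp [valI]
      ring
    rw [this]
    exact (G_ten (valI xs) d hxs.1 hd.1 (by omega)).mpr ⟨hd.2.2, hxs⟩

theorem IsNext_unique (n R1 R2 : Int) (h1 : IsNext n R1) (h2 : IsNext n R2) : R1 = R2 :=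
  le_antisymm (h1.2.2 R2 h2.1 h2.2.1) (h2.2.2 R1 h1.1 h1.2.1)

theorem ediv_lb (k B : Int) (hB : 0 < B) : B * (k / B) ≤ k := by
  have h1 := Int.emod_nonneg k (ne_of_gt hB)
  have h2 := Int.mul_ediv_add_emod k B
  omega

def dec (p : Int × List Int) : Int := p.1 * 10 ^ p.2.length + valI p.2


theorem floordiv_ten (m : Int) : PySem.Int.floordiv m 10 = m / 10 := by
  simp [PySem.Int.floordiv, Int.fdiv_eq_ediv_of_nonneg m (by norm_num : (0:Int) ≤ 10)]

theorem mod_ten (m : Int) : PySem.Int.mod m 10 = m % 10 := by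
  simp [PySem.Int.mod, Int.fmod_eq_emod_of_nonneg m (by norm_num : (0:Int) ≤ 10)]

theorem mod_two (m : Int) : PySem.Int.mod m 2 = m % 2 := by
  simp [PySem.Int.mod, Int.fmod_eq_emod_of_nonneg m (by norm_num : (0:Int) ≤ 2)]

theorem fAux_spec_aux (N : Nat) : ∀ m : Int, 0 ≤ m → m.toNat ≤ N → IsNext m (fAux m) := by
  induction N with
  | zero =>
    intro m hm hN
    have hm0 : m = 0 := by omega
    subst hm0
    rw [fAux, if_pos le_rfl]
    exact ⟨G_zero, le_rfl, fun k hk h0 => h0⟩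
  | succ N ih =>
    intro m hm hN
    by_cases hm0 : m ≤ 0
    · have hm0' : m = 0 := by omega
      subst hm0'
      rw [fAux, if_pos le_rfl]
      exact ⟨G_zero, le_rfl, fun k hk h0 => h0⟩
    · rw [fAux, if_neg hm0]
      simp only [floordiv_ten, mod_ten, mod_two]
      have hq0 : 0 ≤ m / 10 := by omega
      have hqN : (m / 10).toNat ≤ N := by omega
      have hIH := ih (m / 10) hq0 hqN
      by_cases hgq : fAux (m / 10) ≠ m / 10
      · simp only [if_pos hgq]
        obtain ⟨hG, hge, hleast⟩ := hIH
        have hgt : m / 10 + 1 ≤ fAux (m / 10) := by omega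
        refine ⟨G_mul_ten _ hG, by omega, ?_⟩
        intro k hk hkm
        have hkq : G (k / 10) := G_div_ten k hk
        have h1 : m / 10 ≤ k / 10 := by omega
        have h2 := hleast (k / 10) hkq h1
        omega
      · simp only [if_neg hgq]
        rw [not_ne_iff] at hgq
        have hGq : G (m / 10) := hgq ▸ hIH.1
        by_cases hr9 : m % 10 = 9
        · simp only [if_pos hr9]
          have hq1N : (m / 10 + 1).toNat ≤ N := by omega
          have hIH1 := ih (m / 10 + 1) (by omega) hq1N
          obtain ⟨hG1, hge1, hleast1⟩ := hIH1
          refine ⟨G_mul_ten _ hG1, by omega, ?_⟩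
          intro k hk hkm
          have hkq : G (k / 10) := G_div_ten k hk
          have hpar := G_parity k hk
          have h1 : m / 10 + 1 ≤ k / 10 := by omega
          have h2 := hleast1 (k / 10) hkq h1
          omega
        · simp only [if_neg hr9]
          by_cases hre : m % 10 % 2 = 0
          · rw [hre, add_zero]
            refine ⟨?_, le_rfl, fun k hk h0 => h0⟩
            have hme : m = 10 * (m / 10) + m % 10 := by omega
            rw [hme]
            exact (G_ten _ _ hq0 (by omega) (by omega)).mpr ⟨hre, hGq⟩
          · have hro : m % 10 % 2 = 1 := by omega
            rw [hro]
            have hme : m + 1 = 10 * (m / 10) + (m % 10 + 1) := by omega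
            refine ⟨?_, by omega, ?_⟩
            · rw [hme]
              exact (G_ten _ _ hq0 (by omega) (by omega)).mpr ⟨by omega, hGq⟩
            · intro k hk hkm
              have hpar := G_parity k hk
              omega

theorem fAux_spec (m : Int) (hm : 0 ≤ m) : IsNext m (fAux m) :=
  fAux_spec_aux m.toNat m hm le_rfl


theorem G_two : G 2 := by
  have := (G_ten 0 2 le_rfl (by norm_num) (by norm_num)).mpr ⟨by norm_num, G_zero⟩
  simpa using this

theorem aCarry_spec (rv : List Int) : ∀ (acc : List Int),
    (∀ d ∈ rv, 0 ≤ d ∧ d ≤ 9 ∧ d % 2 = 0) → (∀ d ∈ acc, d = 0) →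
    ∃ Q, dec (aCarry rv acc) = Q * 10 ^ acc.length ∧ IsNext (valI rv.reverse + 1) Q := by
  induction rv with
  | nil =>
    intro acc _ hacc
    refine ⟨2, ?_, ?_⟩
    · simp [aCarry, dec, valI_zeros acc hacc]
    · simp only [List.reverse_nil]
      refine ⟨G_two, by simp [valI], ?_⟩
      intro k hk hk1
      have := G_parity k hk
      simp [valI] at hk1 ⊢
      omega
  | cons p ps ih =>
    intro acc hrv hacc
    have hp := hrv p (by simp)
    have hps : ∀ d ∈ ps, 0 ≤ d ∧ d ≤ 9 ∧ d % 2 = 0 := fun d hd => hrv d (by simp [hd])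
    have hW : valI ((p :: ps).reverse) = 10 * valI ps.reverse + p := by
      rw [List.reverse_cons, valI_append]
      simp [valI]
      ring
    have hGW : G (valI ps.reverse) := valI_good _ (fun d hd => hps d (List.mem_reverse.mp hd))
    have hWnn : 0 ≤ valI ps.reverse := hGW.1
    by_cases hp8 : p = 8
    · rw [show aCarry (p :: ps) acc = aCarry ps (0 :: acc) by rw [aCarry, if_pos hp8]]
      obtain ⟨Q', hdec, hnext⟩ := ih (0 :: acc) hps (by
        intro d hd
        rcases List.mem_cons.mp hd with h | h
        · exact h
        · exact hacc d h)
      refine ⟨Q' * 10, ?_, ?_⟩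
      · rw [hdec]
        simp [List.length_cons, pow_succ]
        ring
      · obtain ⟨hGQ, hgeQ, hleastQ⟩ := hnext
        rw [hW, hp8]
        refine ⟨G_mul_ten _ hGQ, by omega, ?_⟩
        intro k hk hk1
        have hpar := G_parity k hk
        have hkq : G (k / 10) := G_div_ten k hk
        have h1 : valI ps.reverse + 1 ≤ k / 10 := by omega
        have h2 := hleastQ (k / 10) hkq h1
        omega
    · rw [show aCarry (p :: ps) acc = (0, ps.reverse ++ (p + 2) :: acc) by
        rw [aCarry, if_neg hp8]]
      refine ⟨10 * valI ps.reverse + p + 2, ?_, ?_⟩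
      · simp only [dec, valI_append, valI_cons, valI_zeros acc hacc,
          List.length_append, List.length_cons]
        rw [pow_succ]
        ring
      · rw [hW]
        refine ⟨?_, by omega, ?_⟩
        · have : 10 * valI ps.reverse + p + 2 = 10 * valI ps.reverse + (p + 2) := by ring
          rw [this]
          exact (G_ten _ _ hWnn (by omega) (by omega)).mpr ⟨by omega, hGW⟩
        · intro k hk hk1
          have hpar := G_parity k hk
          omega

theorem ediv_pow_lb {k : Int} (B : Int) (hB : 0 < B) (X : Int) (h : X * B ≤ k) : X ≤ k / B :=
  (Int.le_ediv_iff_mul_le hB).mpr h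

theorem aScan_spec (rest : List Int) : ∀ (pre : List Int),
    (∀ d ∈ pre, 0 ≤ d ∧ d ≤ 9 ∧ d % 2 = 0) → (∀ d ∈ rest, 0 ≤ d ∧ d ≤ 9) →
    IsNext (valI (pre.reverse ++ rest)) (dec (aScan pre rest)) := by
  induction rest with
  | nil =>
    intro pre hpre _
    rw [show aScan pre [] = (0, pre.reverse) from rfl]
    have hG : G (valI pre.reverse) := valI_good _ (fun d hd => hpre d (List.mem_reverse.mp hd))
    simp only [dec, List.append_nil]
    refine ⟨by simpa using hG, by simp, ?_⟩
    intro k hk h0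
    simpa using h0
  | cons k tl ih =>
    intro pre hpre hrest
    have hk := hrest k (by simp)
    have htl : ∀ d ∈ tl, 0 ≤ d ∧ d ≤ 9 := fun d hd => hrest d (by simp [hd])
    have hP : G (valI pre.reverse) := valI_good _ (fun d hd => hpre d (List.mem_reverse.mp hd))
    set P := valI pre.reverse with hPdef
    set B : Int := 10 ^ tl.length with hBdef
    have hB : 0 < B := by positivity
    have hvt0 : 0 ≤ valI tl := valI_nonneg tl (fun d hd => (htl d hd).1)
    have hvtB : valI tl < B := valI_lt tl htl
    have hN : valI (pre.reverse ++ k :: tl) = (10 * P + k) * B + valI tl := by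
      rw [valI_append, valI_cons, List.length_cons, pow_succ]
      ring
    by_cases hk2 : k % 2 = 1
    · rw [show aScan pre (k :: tl) =
          (if k = 9 then aCarry pre (0 :: tl.map (fun _ => 0))
           else (0, pre.reverse ++ (k + 1) :: tl.map (fun _ => 0))) by
        rw [aScan, mod_two, if_pos hk2]]
      by_cases hk9 : k = 9
      · subst hk9
        rw [if_pos rfl]
        obtain ⟨Q, hdec, hGQ, hgeQ, hleastQ⟩ :=
          aCarry_spec pre (0 :: tl.map (fun _ => 0)) hpre (by
            intro d hd
            rcases List.mem_cons.mp hd with h | h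
            · exact h
            · obtain ⟨x, _, hx⟩ := List.mem_map.mp h
              omega)
        rw [hN, hdec]
        have hlen : (0 :: tl.map (fun _ => (0:Int))).length = tl.length + 1 := by simp
        rw [hlen]
        have hQB : Q * 10 ^ (tl.length + 1) = Q * 10 * B := by rw [pow_succ]; ring
        rw [hQB]
        refine ⟨?_, ?_, ?_⟩
        · have := G_mul_pow (Q * 10) tl.length (G_mul_ten Q hGQ)
          rwa [hBdef]
        · have h1 : P + 1 ≤ Q := by omega
          nlinarith
        · intro k' hk' hk'N
          have hk'0 : 0 ≤ k' := hk'.1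
          have hv : 10 * P + 9 ≤ k' / B := ediv_pow_lb B hB _ (by nlinarith)
          have hGv : G (k' / B) := by
            rw [hBdef]
            exact G_div_pow k' tl.length hk'
          have hGu : G (k' / B / 10) := G_div_ten _ hGv
          have hparv := G_parity _ hGv
          have hu : P + 1 ≤ k' / B / 10 := by omega
          have hQu := hleastQ _ hGu hu
          have hlb1 : B * (k' / B) ≤ k' := ediv_lb k' B hB
          have hlb2 : 10 * (k' / B / 10) ≤ k' / B := by omega
          nlinarith
      · have hk7 : k ≤ 7 := by omega
        rw [if_neg hk9]
        have hdec : dec (0, pre.reverse ++ (k + 1) :: tl.map (fun _ => 0)) =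
            (10 * P + k + 1) * B := by
          simp only [dec, valI_append, valI_cons,
            valI_zeros (tl.map (fun _ => 0)) (by simp),
            List.length_append, List.length_cons, List.length_map]
          rw [pow_succ]
          ring
        rw [hN, hdec]
        refine ⟨?_, by nlinarith, ?_⟩
        · have hG1 : G (10 * P + (k + 1)) :=
            (G_ten _ _ hP.1 (by omega) (by omega)).mpr ⟨by omega, hP⟩
          have := G_mul_pow (10 * P + (k + 1)) tl.length hG1
          rw [hBdef]
          convert this using 2
          ring
        · intro k' hk' hk'N
          have hk'0 : 0 ≤ k' := hk'.1
          have hv : 10 * P + k ≤ k' / B := ediv_pow_lb B hB _ (by nlinarith)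
          have hGv : G (k' / B) := by
            rw [hBdef]
            exact G_div_pow k' tl.length hk'
          have hparv := G_parity _ hGv
          have hv1 : 10 * P + k + 1 ≤ k' / B := by omega
          have hlb1 : B * (k' / B) ≤ k' := ediv_lb k' B hB
          nlinarith
    · rw [show aScan pre (k :: tl) = aScan (k :: pre) tl by
        rw [aScan, mod_two, if_neg hk2]]
      have h := ih (k :: pre) (by
        intro d hd
        rcases List.mem_cons.mp hd with h | h
        · subst h; exact ⟨hk.1, hk.2, by omega⟩
        · exact hpre d h) htl
      rw [show (k :: pre).reverse ++ tl = pre.reverse ++ k :: tl by simp] at h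
      exact h

def valN (l : List Nat) : Nat := l.foldl (fun a d => 10 * a + d) 0

theorem valN_append_singleton (l : List Nat) (x : Nat) :
    valN (l ++ [x]) = 10 * valN l + x := by
  simp [valN, List.foldl_append]

theorem toDigitsCore_spec (n : Nat) : ∀ (f : Nat) (acc : List Char), n < f →
    ∃ ds : List Nat, (∀ d ∈ ds, d < 10) ∧ ds ≠ [] ∧ valN ds = n ∧
      Nat.toDigitsCore 10 f n acc = ds.map Nat.digitChar ++ acc := by
  induction n using Nat.strong_induction_on with
  | _ n ih =>
    intro f acc hf
    match f with
    | 0 => omega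
    | f' + 1 =>
      by_cases hq : n / 10 = 0
      · refine ⟨[n % 10], by intro d hd; simp at hd; omega, by simp, by simp [valN]; omega, ?_⟩
        simp [Nat.toDigitsCore, hq]
      · obtain ⟨ds', hd', hne', hval', heq'⟩ :=
          ih (n / 10) (by omega) f' ((n % 10).digitChar :: acc) (by omega)
        refine ⟨ds' ++ [n % 10], ?_, by simp, ?_, ?_⟩
        · intro d hd
          rcases List.mem_append.mp hd with h | h
          · exact hd' d h
          · simp at h; omega
        · rw [valN_append_singleton, hval']
          omega
        · rw [show Nat.toDigitsCore 10 (f' + 1) n acc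
              = Nat.toDigitsCore 10 f' (n / 10) ((n % 10).digitChar :: acc) by
            simp [Nat.toDigitsCore, hq]]
          rw [heq']
          simp

theorem digitChar_val (d : Nat) (hd : d < 10) :
    (PySem.Int.ofChars? [Nat.digitChar d]).getD 0 = (d : Int) := by
  interval_cases d <;> decide

theorem valI_map_aux (ds : List Nat) : ∀ a : Nat,
    (ds.map (fun d => Int.ofNat d)).foldl (fun a d => 10 * a + d) (Int.ofNat a)
      = Int.ofNat (ds.foldl (fun a d => 10 * a + d) a) := by
  induction ds with
  | nil => intro a; simp
  | cons d t ihs =>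
    intro a
    simp only [List.map_cons, List.foldl_cons]
    rw [show ((10 : Int) * Int.ofNat a + Int.ofNat d) = Int.ofNat (10 * a + d) by simp only [Int.ofNat_eq_natCast]; push_cast; ring]
    exact ihs (10 * a + d)

theorem valI_map_natCast (ds : List Nat) :
    valI (ds.map (fun d => Int.ofNat d)) = Int.ofNat (valN ds) := by
  have := valI_map_aux ds 0
  simpa [valI, valN, Int.ofNat_eq_natCast] using this

theorem main_eq (n : Int) (hn : 0 ≤ n) : nextGood n = nextGood_alt n := by
  obtain ⟨ds, hds, hne, hval, heq⟩ :=
    toDigitsCore_spec n.toNat (n.toNat + 1) [] (by omega)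
  set L : List Int := ds.map (fun d => Int.ofNat d) with hL
  have htc : PySem.Int.toChars n = ds.map Nat.digitChar := by
    rw [PySem.Int.toChars, if_neg (by omega), Nat.toDigits, heq, List.append_nil]
  have hlist : (PySem.Int.toChars n).map (fun c => (PySem.Int.ofChars? [c]).getD 0) = L := by
    rw [htc, List.map_map, hL]
    apply List.map_congr_left
    intro d hd
    exact digitChar_val d (hds d hd)
  have hNval : valI L = n := by
    rw [hL, valI_map_natCast, hval]
    simp only [Int.ofNat_eq_natCast]
    omega
  have hdigits : ∀ d ∈ L, 0 ≤ d ∧ d ≤ 9 := by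
    intro d hd
    obtain ⟨x, hx, rfl⟩ := List.mem_map.mp hd
    have := hds x hx
    simp only [Int.ofNat_eq_natCast]
    omega
  have hA : IsNext n (dec (aScan [] L)) := by
    have h := aScan_spec L [] (by simp) hdigits
    rw [List.reverse_nil, List.nil_append, hNval] at h
    exact h
  have hB : IsNext n (fAux n) := fAux_spec n hn
  have hform : nextGood n = dec (aScan [] L) := by
    simp only [nextGood, hlist]
    show valI ((aScan [] L).1 :: (aScan [] L).2) = dec (aScan [] L)
    rw [valI_cons]
    rfl
  rw [hform]
  show dec (aScan [] L) = fAux n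
  exact IsNext_unique n _ _ hA hB

-- ===== VERDICT (by name: the statement is the Claim_ definition above) =====
theorem nextGood_spec : Claim_equal_nextGood := by
  intro n _ hpre
  exact main_eq n hpre
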